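-- pv_equiv track=rewrite | github.com/Tocktock/ConerstoneMemory | src/memory_engine/runtime/policy.py | _classifier_sensitivity
-- ===== SOURCE A (Python) =====
-- from typing import Any
--
-- def _classifier_sensitivity(fields: dict[str, Any]) -> str:
--     normalized_keys = {str(key).lower() for key in fields}
--     normalized_values = " ".join(str(value).lower() for value in fields.values() if value is not None)
--     if {"password", "secret", "token", "ssn"} & normalized_keys:
--         return "S4_RESTRICTED"
--     if {"salary", "medical", "diagnosis"} & normalized_keys:
--         return "S3_CONFIDENTIAL"
--     if {"address", "email", "phone", "customer", "domain"} & normalized_keys: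
--         return "S2_PERSONAL"
--     if any(marker in normalized_values for marker in ["ssn", "password", "secret token"]):
--         return "S4_RESTRICTED"
--     if any(marker in normalized_values for marker in ["salary", "medical", "diagnosis"]):
--         return "S3_CONFIDENTIAL"
--     return "S1_INTERNAL"
-- ===== SOURCE B (Python) =====
-- _KEY_RANK = {
--     "password": 4, "secret": 4, "token": 4, "ssn": 4,
--     "salary": 3, "medical": 3, "diagnosis": 3,
--     "address": 2, "email": 2, "phone": 2, "customer": 2, "domain": 2,
-- }
-- _LEVEL = {4: "S4_RESTRICTED", 3: "S3_CONFIDENTIAL", 2: "S2_PERSONAL"}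
--
--
-- def _classifier_sensitivity(fields):
--     best = 0
--     for key in fields:
--         best = max(best, _KEY_RANK.get(str(key).lower(), 0))
--     if best:
--         return _LEVEL[best]
--     joined = " ".join(str(v).lower() for v in fields.values() if v is not None)
--     if any(m in joined for m in ("ssn", "password", "secret token")):
--         return "S4_RESTRICTED"
--     if any(m in joined for m in ("salary", "medical", "diagnosis")):
--         return "S3_CONFIDENTIAL"
--     return "S1_INTERNAL"
-- ===== Notes on version B (the rewrite author's own statement) =====
-- stated objective: idiomatic
-- what changed: Replaces the three set-intersection checks with one data-driven pass over the keys that keeps a running maximum sensitivity rank looked up in a single keyword->rank dict, then maps the best rank to its level; the value scan is unchanged.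
import Mathlib
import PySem

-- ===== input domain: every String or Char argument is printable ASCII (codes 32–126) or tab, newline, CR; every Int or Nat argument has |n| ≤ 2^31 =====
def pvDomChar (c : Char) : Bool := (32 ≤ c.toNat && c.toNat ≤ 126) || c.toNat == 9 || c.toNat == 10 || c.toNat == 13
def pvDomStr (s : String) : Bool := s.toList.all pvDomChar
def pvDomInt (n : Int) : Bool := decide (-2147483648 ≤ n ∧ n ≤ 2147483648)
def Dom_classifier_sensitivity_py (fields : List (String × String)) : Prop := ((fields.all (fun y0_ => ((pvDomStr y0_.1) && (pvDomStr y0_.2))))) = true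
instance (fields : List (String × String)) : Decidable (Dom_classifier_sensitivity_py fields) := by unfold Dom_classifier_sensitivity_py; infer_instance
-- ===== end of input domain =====

-- B replaces A's three set-intersection key checks with one data-driven pass keeping a running max rank from a keyword->rank dict (idiomatic; same cost; value scan unchanged).


-- ===== PORT A =====
def classifier_sensitivity_py (fields : List (String × String)) : String :=
  let d := PySem.Dict.ofList fields
  let normalized_keys : PySem.Set String := PySem.Set.ofList (d.keys.map (fun k => PySem.Str.lower k))
  let normalized_values : String := PySem.Str.join " " (d.values.map (fun v => PySem.Str.lower v))
  if PySem.Set.inter (PySem.Set.ofList ["password", "secret", "token", "ssn"]) normalized_keys ≠ [] then "S4_RESTRICTED"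
  else if PySem.Set.inter (PySem.Set.ofList ["salary", "medical", "diagnosis"]) normalized_keys ≠ [] then "S3_CONFIDENTIAL"
  else if PySem.Set.inter (PySem.Set.ofList ["address", "email", "phone", "customer", "domain"]) normalized_keys ≠ [] then "S2_PERSONAL"
  else if (["ssn", "password", "secret token"] : List String).any (fun m => PySem.Str.isIn m normalized_values) then "S4_RESTRICTED"
  else if (["salary", "medical", "diagnosis"] : List String).any (fun m => PySem.Str.isIn m normalized_values) then "S3_CONFIDENTIAL"
  else "S1_INTERNAL"

-- ===== PORT B =====
-- B-side helpers: the module-level keyword->rank and rank->level tables of Source B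
def pvKeyRank : PySem.Dict String Int :=
  PySem.Dict.ofList [("password", 4), ("secret", 4), ("token", 4), ("ssn", 4),
    ("salary", 3), ("medical", 3), ("diagnosis", 3),
    ("address", 2), ("email", 2), ("phone", 2), ("customer", 2), ("domain", 2)]

def pvLevel : PySem.Dict Int String :=
  PySem.Dict.ofList [(4, "S4_RESTRICTED"), (3, "S3_CONFIDENTIAL"), (2, "S2_PERSONAL")]

def classifier_sensitivity_py_alt (fields : List (String × String)) : String :=
  let d := PySem.Dict.ofList fields
  let best : Int := d.keys.foldl (fun b k => max b (pvKeyRank.getD (PySem.Str.lower k) 0)) 0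
  if best ≠ 0 then
    -- _LEVEL[best]; the KeyError arm is unreachable (best ∈ {2, 3, 4} whenever best ≠ 0)
    match pvLevel.get? best with
    | some s => s
    | none => ""
  else
    let joined := PySem.Str.join " " (d.values.map (fun v => PySem.Str.lower v))
    if (["ssn", "password", "secret token"] : List String).any (fun m => PySem.Str.isIn m joined) then "S4_RESTRICTED"
    else if (["salary", "medical", "diagnosis"] : List String).any (fun m => PySem.Str.isIn m joined) then "S3_CONFIDENTIAL"
    else "S1_INTERNAL"

-- ===== PRECONDITION & SPEC =====
def Spec_classifier_sensitivity_py (fields : List (String × String)) (out : String) : Prop := out = classifier_sensitivity_py_alt fields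
instance (fields : List (String × String)) (out : String) : Decidable (Spec_classifier_sensitivity_py fields out) := by unfold Spec_classifier_sensitivity_py; infer_instance

-- ===== CLAIM (what is proved, stated in full; the proofs are below) =====
def Claim_equal_classifier_sensitivity_py : Prop := ∀ (fields : List (String × String)), Dom_classifier_sensitivity_py fields → Spec_classifier_sensitivity_py fields (classifier_sensitivity_py fields)

-- ===== LEMMAS AND PROOFS =====

-- rank lookup in Source B's keyword table, as the if-chain over the three keyword groups
set_option maxHeartbeats 1000000 in
lemma rank_eq (k : String) : pvKeyRank.getD k 0 =
    if k ∈ (["password", "secret", "token", "ssn"] : List String) then 4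
    else if k ∈ (["salary", "medical", "diagnosis"] : List String) then 3
    else if k ∈ (["address", "email", "phone", "customer", "domain"] : List String) then 2
    else 0 := by
  have h : pvKeyRank = PySem.Dict.mk [("password", 4), ("secret", 4), ("token", 4), ("ssn", 4),
    ("salary", 3), ("medical", 3), ("diagnosis", 3),
    ("address", 2), ("email", 2), ("phone", 2), ("customer", 2), ("domain", 2)] := by rfl
  rw [h]
  simp [PySem.Dict.getD_eq_get?_getD, PySem.Dict.get?_mk_cons, List.mem_cons]
  split_ifs <;> simp_all [eq_comm, PySem.Dict.get?]

-- upper bound for B's running-max loop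
lemma foldl_max_le (l : List String) (g : String → Int) (b c : Int) (hb : b ≤ c)
    (h : ∀ k ∈ l, g k ≤ c) : l.foldl (fun a k => max a (g k)) b ≤ c := by
  induction l generalizing b with
  | nil => simpa using hb
  | cons k t ih =>
    exact ih _ (max_le hb (h k (List.mem_cons_self))) (fun j hj => h j (List.mem_cons_of_mem _ hj))

-- A's set-intersection truthiness test, as an existential over the raw keys
lemma inter_cond (lit : List String) (keys : List String) :
    (PySem.Set.inter (PySem.Set.ofList lit)
      (PySem.Set.ofList (keys.map (fun k => PySem.Str.lower k))) ≠ []) ↔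
    ∃ k ∈ keys, PySem.Str.lower k ∈ lit := by
  rw [← List.isEmpty_eq_false_iff, List.isEmpty_eq_false_iff_exists_mem]
  constructor
  · rintro ⟨x, hx⟩
    rw [PySem.Set.mem_inter, PySem.Set.mem_ofList, PySem.Set.mem_ofList, List.mem_map] at hx
    obtain ⟨h1, k, hk, rfl⟩ := hx
    exact ⟨k, hk, h1⟩
  · rintro ⟨k, hk, h1⟩
    exact ⟨PySem.Str.lower k, by
      rw [PySem.Set.mem_inter, PySem.Set.mem_ofList, PySem.Set.mem_ofList, List.mem_map]
      exact ⟨h1, k, hk, rfl⟩⟩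

lemma core_eq (fields : List (String × String)) :
    classifier_sensitivity_py fields = classifier_sensitivity_py_alt fields := by
  simp only [classifier_sensitivity_py, classifier_sensitivity_py_alt]
  set l := (PySem.Dict.ofList fields).keys with hl
  set g : String → Int := fun k => pvKeyRank.getD (PySem.Str.lower k) 0 with hg
  by_cases h4 : ∃ k ∈ l, PySem.Str.lower k ∈ (["password", "secret", "token", "ssn"] : List String)
  · rw [if_pos ((inter_cond _ _).mpr h4)]
    obtain ⟨k0, hk0, hm0⟩ := h4
    have hgk : g k0 = 4 := by rw [hg]; simp only; rw [rank_eq, if_pos hm0]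
    have low : (4 : Int) ≤ l.foldl (fun b k => max b (g k)) 0 :=
      hgk ▸ (PySem.List.le_foldl_max_int l g 0).2 k0 hk0
    have up : l.foldl (fun b k => max b (g k)) 0 ≤ 4 :=
      foldl_max_le l g 0 4 (by norm_num)
        (fun k _ => by rw [hg]; simp only; rw [rank_eq]; split_ifs <;> norm_num)
    have hM : l.foldl (fun b k => max b (g k)) 0 = 4 := le_antisymm up low
    rw [hM]
    norm_num
    rfl
  · rw [if_neg (fun hc => h4 ((inter_cond _ _).mp hc))]
    by_cases h3 : ∃ k ∈ l, PySem.Str.lower k ∈ (["salary", "medical", "diagnosis"] : List String)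
    · rw [if_pos ((inter_cond _ _).mpr h3)]
      obtain ⟨k0, hk0, hm0⟩ := h3
      have hgk : g k0 = 3 := by
        rw [hg]; simp only; rw [rank_eq, if_neg (fun h => h4 ⟨k0, hk0, h⟩), if_pos hm0]
      have low : (3 : Int) ≤ l.foldl (fun b k => max b (g k)) 0 :=
        hgk ▸ (PySem.List.le_foldl_max_int l g 0).2 k0 hk0
      have up : l.foldl (fun b k => max b (g k)) 0 ≤ 3 :=
        foldl_max_le l g 0 3 (by norm_num)
          (fun k hk => by
            rw [hg]; simp only; rw [rank_eq, if_neg (fun h => h4 ⟨k, hk, h⟩)]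
            split_ifs <;> norm_num)
      have hM : l.foldl (fun b k => max b (g k)) 0 = 3 := le_antisymm up low
      rw [hM]
      norm_num
      rfl
    · rw [if_neg (fun hc => h3 ((inter_cond _ _).mp hc))]
      by_cases h2 : ∃ k ∈ l, PySem.Str.lower k ∈
          (["address", "email", "phone", "customer", "domain"] : List String)
      · rw [if_pos ((inter_cond _ _).mpr h2)]
        obtain ⟨k0, hk0, hm0⟩ := h2
        have hgk : g k0 = 2 := by
          rw [hg]; simp only
          rw [rank_eq, if_neg (fun h => h4 ⟨k0, hk0, h⟩), if_neg (fun h => h3 ⟨k0, hk0, h⟩),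
            if_pos hm0]
        have low : (2 : Int) ≤ l.foldl (fun b k => max b (g k)) 0 :=
          hgk ▸ (PySem.List.le_foldl_max_int l g 0).2 k0 hk0
        have up : l.foldl (fun b k => max b (g k)) 0 ≤ 2 :=
          foldl_max_le l g 0 2 (by norm_num)
            (fun k hk => by
              rw [hg]; simp only
              rw [rank_eq, if_neg (fun h => h4 ⟨k, hk, h⟩), if_neg (fun h => h3 ⟨k, hk, h⟩)]
              split_ifs <;> norm_num)
        have hM : l.foldl (fun b k => max b (g k)) 0 = 2 := le_antisymm up low
        rw [hM]
        norm_num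
        rfl
      · rw [if_neg (fun hc => h2 ((inter_cond _ _).mp hc))]
        have up : l.foldl (fun b k => max b (g k)) 0 ≤ 0 :=
          foldl_max_le l g 0 0 le_rfl
            (fun k hk => by
              rw [hg]; simp only
              rw [rank_eq, if_neg (fun h => h4 ⟨k, hk, h⟩), if_neg (fun h => h3 ⟨k, hk, h⟩),
                if_neg (fun h => h2 ⟨k, hk, h⟩)])
        have low : (0 : Int) ≤ l.foldl (fun b k => max b (g k)) 0 :=
          (PySem.List.le_foldl_max_int l g 0).1
        have hM : l.foldl (fun b k => max b (g k)) 0 = 0 := le_antisymm up low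
        rw [hM]
        norm_num

-- ===== VERDICT (by name: the statement is the Claim_ definition above) =====
theorem classifier_sensitivity_py_spec : Claim_equal_classifier_sensitivity_py := by
  intro fields _
  unfold Spec_classifier_sensitivity_py
  exact core_eq fields
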